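-- pv_equiv track=rewrite | github.com/Philipjj609/puzzle_generator | task2_logic/nonogram_generator.py | line_options
-- ===== SOURCE A (Python) =====
-- def line_options(clue: list[int], length: int) -> list[tuple[int, ...]]:
--     """
--     Return every 0/1 tuple of `length` cells consistent with `clue`.
--     Uses recursive block placement; correct for all clue/length combos.
--     """
--     if not clue or clue == [0]:
--         return [tuple([0] * length)]
--
--     results: list[tuple[int, ...]] = []
--
--     def place(block_idx: int, min_start: int, prefix: list[int]) -> None:
--         if block_idx == len(clue):
--             full = prefix + [0] * (length - len(prefix))
--             results.append(tuple(full))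
--             return
--
--         block = clue[block_idx]
--         # Minimum space needed for every remaining block (including separators)
--         tail_min = (
--             sum(clue[block_idx + 1 :]) + (len(clue) - block_idx - 1)
--             if block_idx + 1 < len(clue)
--             else 0
--         )
--         max_start = length - block - tail_min
--
--         for start in range(min_start, max_start + 1):
--             new_prefix = prefix + [0] * (start - len(prefix)) + [1] * block
--             if block_idx + 1 < len(clue):
--                 place(block_idx + 1, len(new_prefix) + 1, new_prefix + [0])
--             else:
--                 place(block_idx + 1, len(new_prefix), new_prefix)
--
--     place(0, 0, [])
--     return results
-- ===== SOURCE B (Python) =====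
-- def line_options(clue: list[int], length: int) -> list[tuple[int, ...]]:
--     """Build lines by distributing the free zeros over the gaps: combine each
--     head (gap zeros + block ones + separator) with recursively built tails,
--     tracking only the remaining cell budget instead of absolute positions."""
--     if not clue or clue == [0]:
--         return [tuple([0] * length)]
--
--     def build(blocks: list[int], rem: int) -> list[tuple[int, ...]]:
--         if not blocks:
--             return [(0,) * rem]
--         b, bs = blocks[0], blocks[1:]
--         tail_min = sum(bs) + len(bs)  # cells the remaining blocks and separators need
--         sep = (0,) if bs else ()
--         out = []
--         for g in range(rem - b - tail_min + 1):
--             head = (0,) * g + (1,) * b + sep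
--             for tail in build(bs, rem - len(head)):
--                 out.append(head + tail)
--         return out
--
--     return build(clue, length)
-- ===== Notes on version B (the rewrite author's own statement) =====
-- stated objective: alternative
-- what changed: Replaces A's recursion that threads absolute start positions and a growing prefix into a shared results accumulator by a gap-distribution scheme: recursively distribute the remaining cell budget over the gaps and combine each head (gap zeros + block ones + separator) with independently built tails.
import Mathlib
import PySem

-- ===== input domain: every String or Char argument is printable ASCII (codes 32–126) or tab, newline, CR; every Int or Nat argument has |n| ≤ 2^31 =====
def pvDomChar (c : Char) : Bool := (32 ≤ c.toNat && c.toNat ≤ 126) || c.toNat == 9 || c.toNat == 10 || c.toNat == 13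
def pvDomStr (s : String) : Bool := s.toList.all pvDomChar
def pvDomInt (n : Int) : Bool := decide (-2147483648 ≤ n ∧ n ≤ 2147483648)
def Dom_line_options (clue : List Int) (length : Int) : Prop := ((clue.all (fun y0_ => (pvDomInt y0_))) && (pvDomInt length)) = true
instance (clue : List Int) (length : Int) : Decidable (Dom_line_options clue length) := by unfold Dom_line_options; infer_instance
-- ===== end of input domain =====

-- B replaces A's position/prefix-threading recursion by a slack-composition scheme
-- (distribute the free zeros over the gaps and combine heads with recursively built tails);
-- same cost class, different decomposition.

-- ===== PORT A =====
-- A's inner `place`, transliterated: the block index becomes the structural suffix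
-- `rest = clue[block_idx:]` (so `len(clue) - block_idx - 1 = rest.tail.length`);
-- `[0]*k` / `[1]*block` with possibly negative count = List.replicate ·.toNat (Python's `*`).
def placeA (length : Int) (rest : List Int) (min_start : Int) («prefix» : List Int)
    (results : List (List Int)) : List (List Int) :=
  match rest with
  | [] => results ++ [«prefix» ++ List.replicate (length - «prefix».length).toNat 0]
  | block :: restTail =>
      let tail_min : Int := if 0 < restTail.length then restTail.sum + restTail.length else 0
      let max_start := length - block - tail_min
      (PySem.List.pyRange min_start (max_start + 1) 1).foldl
        (fun res start =>
          let new_prefix := «prefix» ++ List.replicate (start - («prefix».length : Int)).toNat 0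
              ++ List.replicate block.toNat 1
          if 0 < restTail.length then
            placeA length restTail ((new_prefix.length : Int) + 1) (new_prefix ++ [0]) res
          else
            placeA length restTail (new_prefix.length : Int) new_prefix res)
        results
termination_by rest.length
decreasing_by all_goals simp

def line_options (clue : List Int) (length : Int) : List (List Int) :=
  if clue = [] ∨ clue = [0] then [List.replicate length.toNat 0]
  else placeA length clue 0 [] []

-- ===== PORT B =====
-- B's inner `build`: distribute the free zeros over the gaps, tracking the remaining
-- cell budget `rem`; `(0,)*g + (1,)*b + sep + tail` with Python's `*` = replicate ·.toNat.
def buildB (blocks : List Int) (rem : Int) : List (List Int) :=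
  match blocks with
  | [] => [List.replicate rem.toNat 0]
  | b :: bs =>
      let tail_min : Int := bs.sum + bs.length
      let sep : List Int := if bs ≠ [] then [0] else []
      (PySem.List.pyRange 0 (rem - b - tail_min + 1) 1).foldl
        (fun out g =>
          let head := List.replicate g.toNat 0 ++ List.replicate b.toNat 1 ++ sep
          (buildB bs (rem - head.length)).foldl (fun out tail => out ++ [head ++ tail]) out)
        []
termination_by blocks.length
decreasing_by all_goals simp

def line_options_alt (clue : List Int) (length : Int) : List (List Int) :=
  if clue = [] ∨ clue = [0] then [List.replicate length.toNat 0]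
  else buildB clue length

-- ===== PRECONDITION & SPEC =====
def Spec_line_options (clue : List Int) (length : Int) (out : List (List Int)) : Prop :=
  out = line_options_alt clue length
instance (clue : List Int) (length : Int) (out : List (List Int)) :
    Decidable (Spec_line_options clue length out) := by unfold Spec_line_options; infer_instance

-- ===== CLAIM (what is proved, stated in full; the proofs are below) =====
def Claim_equal_line_options : Prop := ∀ (clue : List Int) (length : Int),
  Dom_line_options clue length → Spec_line_options clue length (line_options clue length)

-- ===== LEMMAS AND PROOFS =====

theorem buildB_cons (b : Int) (bs : List Int) (rem : Int) :
    buildB (b :: bs) rem = (PySem.List.pyRange 0 (rem - b - (bs.sum + (bs.length : Int)) + 1) 1).flatMap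
      (fun g =>
        (buildB bs (rem - ((List.replicate g.toNat (0 : Int) ++ List.replicate b.toNat 1 ++
            (if bs ≠ [] then [0] else [])).length : Int))).map
          (fun tail => List.replicate g.toNat 0 ++ (List.replicate b.toNat 1 ++
            ((if bs ≠ [] then [0] else []) ++ tail)))) := by
  conv_lhs => rw [buildB]
  simp only [PySem.List.foldl_append_singleton_eq_map, PySem.List.foldl_append_eq_flatMap,
    List.nil_append, List.append_assoc]

theorem place_eq (length : Int) : ∀ (rest : List Int)
    («prefix» : List Int) (ms : Int) (results : List (List Int)),
    ms = («prefix».length : Int) →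
    placeA length rest ms «prefix» results =
      results ++ (buildB rest (length - «prefix».length)).map («prefix» ++ ·) := by
  intro rest
  induction rest with
  | nil =>
      intro «prefix» ms results hms
      subst hms
      simp [placeA, buildB]
  | cons b bs IH =>
      intro «prefix» ms results hms
      subst hms
      have htm : (if 0 < bs.length then bs.sum + (bs.length : Int) else 0)
          = bs.sum + (bs.length : Int) := by cases bs <;> simp
      rw [placeA]
      simp only [htm]
      rw [buildB_cons, List.map_flatMap, PySem.List.pyRange_one, PySem.List.pyRange_one]
      rw [show (length - («prefix».length : Int) - b - (bs.sum + (bs.length : Int)) + 1 - 0).toNat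
            = (length - b - (bs.sum + (bs.length : Int)) + 1 - «prefix».length).toNat by omega]
      rw [List.foldl_map, List.flatMap_map]
      simp only [zero_add, Int.toNat_natCast, add_sub_cancel_left]
      refine Eq.trans (PySem.List.foldl_congr_mem' _ _
        (g := fun (res : List (List Int)) (k : Nat) =>
          res ++ (buildB bs (length - («prefix».length : Int) -
              ((List.replicate k (0 : Int) ++ List.replicate b.toNat 1 ++
                (if bs ≠ [] then [0] else [])).length : Int))).map
            (fun tail => «prefix» ++ (List.replicate k 0 ++ (List.replicate b.toNat 1 ++
              ((if bs ≠ [] then [0] else []) ++ tail))))) results ?_) ?_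
      · intro k _ res
        by_cases hbse : bs = []
        · subst hbse
          rw [if_neg (by simp : ¬ (0 : Nat) < List.length ([] : List Int))]
          refine Eq.trans (IH _ _ res rfl) ?_
          have harg : length - ((«prefix» ++ List.replicate k (0 : Int) ++
                List.replicate b.toNat 1).length : Int)
              = length - («prefix».length : Int) -
                ((List.replicate k (0 : Int) ++ List.replicate b.toNat 1 ++
                  (if ([] : List Int) ≠ [] then [0] else [])).length : Int) := by
            push_cast [List.length_append, List.length_replicate, List.length_nil,
              if_neg (by simp : ¬ (([] : List Int) ≠ []))]
            ring
          rw [harg]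
          simp [List.append_assoc]
        · rw [if_pos (List.length_pos_iff.mpr hbse)]
          refine Eq.trans (IH _ _ res (by push_cast [List.length_append, List.length_replicate,
            List.length_cons, List.length_nil]; ring)) ?_
          have harg : length - ((«prefix» ++ List.replicate k (0 : Int) ++
                List.replicate b.toNat 1 ++ [0]).length : Int)
              = length - («prefix».length : Int) -
                ((List.replicate k (0 : Int) ++ List.replicate b.toNat 1 ++
                  (if bs ≠ [] then [0] else [])).length : Int) := by
            push_cast [List.length_append, List.length_replicate, List.length_cons,
              List.length_nil, if_pos hbse]
            ring
          rw [harg]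
          simp [List.append_assoc, hbse]
      · rw [PySem.List.foldl_append_eq_flatMap]
        simp [List.map_map, Function.comp_def, List.append_assoc]

-- ===== VERDICT (by name: the statement is the Claim_ definition above) =====
theorem line_options_spec : Claim_equal_line_options := by
  intro clue length _
  unfold Spec_line_options line_options line_options_alt
  split
  · rfl
  · have := place_eq length clue [] 0 [] (by simp)
    simpa using this
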